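-- pv_equiv track=rewrite | github.com/MelissaLikesPython/processing-text | isMobileNumber.py | isMobileNumberWithSpace
-- ===== SOURCE A (Python) =====
-- def isMobileNumberWithSpace(text):
--     if len(text) != 12:
--         return False
--     for i in range(len(text)):
--         if not (text[0:5].isdecimal()
--                 and text[5].isspace()
--                 and text[6:13].isdecimal()):
--             return False
--     return True
-- ===== SOURCE B (Python) =====
-- def isMobileNumberWithSpace(text):
--     if len(text) != 12:
--         return False
--     for i, c in enumerate(text):
--         if i == 5:
--             if not c.isspace():
--                 return False
--         elif not c.isdecimal():
--             return False
--     return True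
-- ===== Notes on version B (the rewrite author's own statement) =====
-- stated objective: simpler
-- what changed: Replaces A's redundant len(text)-iteration loop that re-checks the same three slice tests each pass with a single enumerate pass dispatching on the index (position 5 must be whitespace, all others decimal).
import Mathlib
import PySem

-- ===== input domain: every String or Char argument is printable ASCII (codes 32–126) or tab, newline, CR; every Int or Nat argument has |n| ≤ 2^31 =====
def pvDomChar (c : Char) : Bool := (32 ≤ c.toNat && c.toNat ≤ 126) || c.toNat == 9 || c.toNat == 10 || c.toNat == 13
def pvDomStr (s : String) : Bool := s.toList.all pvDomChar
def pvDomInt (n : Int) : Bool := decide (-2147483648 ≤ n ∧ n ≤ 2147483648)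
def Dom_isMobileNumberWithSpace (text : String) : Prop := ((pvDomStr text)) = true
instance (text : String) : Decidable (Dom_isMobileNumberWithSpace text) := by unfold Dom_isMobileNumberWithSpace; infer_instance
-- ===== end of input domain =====

-- B replaces A's loop that re-checks the same three slice tests len(text) times with one
-- enumerate pass dispatching on the index (objective: simpler).
-- Python's str.isdecimal agrees with str.isdigit on the ASCII domain Dom_, so both ports
-- use PySem.Chars.strIsdigit / isdigit (exact on Dom_).

-- ===== PORT A =====
-- the loop body's condition (it does not mention i, exactly as in A)
def pvCondA (cs : List Char) : Bool :=
  PySem.Chars.strIsdigit (PySem.List.slice cs (some 0) (some 5))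
  && (match PySem.List.pyGet? cs 5 with
      | some c => PySem.Chars.isspace c
      | none => false)   -- unreachable: the len-guard ensures index 5 exists
  && PySem.Chars.strIsdigit (PySem.List.slice cs (some 6) (some 13))

-- 'for i in range(len(text)): if not cond: return False' as structural recursion on the range
def pvLoopA (cs : List Char) : List Int → Bool
  | [] => true
  | _ :: rest => if !(pvCondA cs) then false else pvLoopA cs rest

def isMobileNumberWithSpace (text : String) : Bool :=
  let cs := text.toList
  if cs.length ≠ 12 then false
  else pvLoopA cs (PySem.List.pyRange 0 (cs.length : Int) 1)

-- ===== PORT B =====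
-- 'for i, c in enumerate(text): …' as structural recursion on the enumerated list
def pvLoopB : List (Int × Char) → Bool
  | [] => true
  | (i, c) :: rest =>
      if i == 5 then
        if !(PySem.Chars.isspace c) then false else pvLoopB rest
      else if !(PySem.Chars.isdigit c) then false
      else pvLoopB rest

def isMobileNumberWithSpace_alt (text : String) : Bool :=
  let cs := text.toList
  if cs.length ≠ 12 then false
  else pvLoopB (PySem.List.enumerate cs)

-- ===== PRECONDITION & SPEC =====
def Spec_isMobileNumberWithSpace (text : String) (out : Bool) : Prop := out = isMobileNumberWithSpace_alt text
instance (text : String) (out : Bool) : Decidable (Spec_isMobileNumberWithSpace text out) := by unfold Spec_isMobileNumberWithSpace; infer_instance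

-- ===== CLAIM (what is proved, stated in full; the proofs are below) =====
def Claim_equal_isMobileNumberWithSpace : Prop := ∀ (text : String), Dom_isMobileNumberWithSpace text → Spec_isMobileNumberWithSpace text (isMobileNumberWithSpace text)

-- ===== LEMMAS AND PROOFS =====

-- the two ports agree on every 12-character list (length mismatch is handled separately)
theorem pv_eq_of_len12 (a b c d e f g h i j k l : Char) :
    pvLoopA [a,b,c,d,e,f,g,h,i,j,k,l] (PySem.List.pyRange 0 12 1)
      = pvLoopB (PySem.List.enumerate [a,b,c,d,e,f,g,h,i,j,k,l]) := by
  have hr : PySem.List.pyRange 0 12 1 = [0,1,2,3,4,5,6,7,8,9,10,11] := by decide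
  rw [hr]
  simp [pvLoopA, pvLoopB, pvCondA, PySem.List.enumerate, PySem.Chars.strIsdigit,
    PySem.List.slice, PySem.List.pyGet?, PySem.List.pyIdx?, Bool.and_assoc]

-- ===== VERDICT (by name: the statement is the Claim_ definition above) =====
theorem isMobileNumberWithSpace_spec : Claim_equal_isMobileNumberWithSpace := by
  intro text _
  unfold Spec_isMobileNumberWithSpace isMobileNumberWithSpace isMobileNumberWithSpace_alt
  by_cases h : text.toList.length = 12
  · match hcs : text.toList, h with
    | [a,b,c,d,e,f,g,h',i,j,k,l], _ =>
      simpa using pv_eq_of_len12 a b c d e f g h' i j k l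
  · rw [String.length_toList] at h
    simp [h]
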